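-- pv_equiv track=rewrite | github.com/jeongsungjin/2026_CES_CTRL | CNN/simulation.py | get_vehicle_pixels
-- ===== SOURCE A (Python) =====
-- MAP_SIZE = 64
--
-- def in_bounds(r, c):
--     return 0 <= r < MAP_SIZE and 0 <= c < MAP_SIZE
--
-- def get_vehicle_pixels(r, c, height, width):
--     coords = []
--     for i in range(height):
--         for j in range(width):
--             rr = r + i
--             cc = c + j
--             if in_bounds(rr, cc):
--                 coords.append((rr, cc))
--     return coords
-- ===== SOURCE B (Python) =====
-- MAP_SIZE = 64
--
-- def get_vehicle_pixels(r, c, height, width):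
--     row_lo, row_hi = max(r, 0), min(r + height, MAP_SIZE)
--     col_lo, col_hi = max(c, 0), min(c + width, MAP_SIZE)
--     return [(rr, cc) for rr in range(row_lo, row_hi) for cc in range(col_lo, col_hi)]
-- ===== Notes on version B (the rewrite author's own statement) =====
-- stated objective: faster
-- what changed: Replace the per-cell nested bounds test with closed-form interval intersection: clip [r, r+height) and [c, c+width) against [0, MAP_SIZE) once, then emit the Cartesian product of the two clipped ranges in row-major order.
import Mathlib
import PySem

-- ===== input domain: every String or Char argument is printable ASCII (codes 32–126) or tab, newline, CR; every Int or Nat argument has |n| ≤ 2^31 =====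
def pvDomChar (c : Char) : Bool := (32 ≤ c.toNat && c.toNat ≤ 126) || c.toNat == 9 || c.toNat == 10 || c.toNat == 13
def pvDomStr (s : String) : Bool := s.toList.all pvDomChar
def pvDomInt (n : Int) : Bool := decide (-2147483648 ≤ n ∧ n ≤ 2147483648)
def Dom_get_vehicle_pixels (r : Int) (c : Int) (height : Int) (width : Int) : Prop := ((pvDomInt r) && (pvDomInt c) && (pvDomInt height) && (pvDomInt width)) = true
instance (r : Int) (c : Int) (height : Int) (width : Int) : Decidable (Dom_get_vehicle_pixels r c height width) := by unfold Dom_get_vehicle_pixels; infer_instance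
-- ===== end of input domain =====

-- B replaces A's per-cell bounds test with closed-form interval intersection (clip the row and
-- column ranges against [0, MAP_SIZE) once) and emits the Cartesian product in row-major order.

-- ===== PORT A =====
def in_bounds (r : Int) (c : Int) : Bool :=
  decide (0 ≤ r ∧ r < 64) && decide (0 ≤ c ∧ c < 64)

def get_vehicle_pixels (r : Int) (c : Int) (height : Int) (width : Int) : List (Int × Int) :=
  (PySem.List.pyRange 0 height 1).foldl (fun coords i =>
    (PySem.List.pyRange 0 width 1).foldl (fun coords j =>
      let rr := r + i
      let cc := c + j
      if in_bounds rr cc then coords ++ [(rr, cc)] else coords) coords) []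

-- ===== PORT B =====
def get_vehicle_pixels_alt (r : Int) (c : Int) (height : Int) (width : Int) : List (Int × Int) :=
  let row_lo := max r 0
  let row_hi := min (r + height) 64
  let col_lo := max c 0
  let col_hi := min (c + width) 64
  (PySem.List.pyRange row_lo row_hi 1).flatMap (fun rr =>
    (PySem.List.pyRange col_lo col_hi 1).map (fun cc => (rr, cc)))

-- ===== PRECONDITION & SPEC =====
def Spec_get_vehicle_pixels (r : Int) (c : Int) (height : Int) (width : Int) (out : List (Int × Int)) : Prop := out = get_vehicle_pixels_alt r c height width
instance (r : Int) (c : Int) (height : Int) (width : Int) (out : List (Int × Int)) : Decidable (Spec_get_vehicle_pixels r c height width out) := by unfold Spec_get_vehicle_pixels; infer_instance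

-- ===== CLAIM (what is proved, stated in full; the proofs are below) =====
def Claim_equal_get_vehicle_pixels : Prop := ∀ (r : Int) (c : Int) (height : Int) (width : Int), Dom_get_vehicle_pixels r c height width → Spec_get_vehicle_pixels r c height width (get_vehicle_pixels r c height width)

-- ===== LEMMAS AND PROOFS =====

-- two strictly increasing integer lists with the same members are equal
theorem eq_of_pairwise_lt_of_mem_iff {l₁ l₂ : List Int}
    (h₁ : l₁.Pairwise (· < ·)) (h₂ : l₂.Pairwise (· < ·))
    (hm : ∀ x, x ∈ l₁ ↔ x ∈ l₂) : l₁ = l₂ := by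
  have d₁ : l₁.Nodup := h₁.imp (fun h => ne_of_lt h)
  have d₂ : l₂.Nodup := h₂.imp (fun h => ne_of_lt h)
  have hp : l₁.Perm l₂ := (List.perm_ext_iff_of_nodup d₁ d₂).mpr hm
  exact hp.eq_of_pairwise (fun a b _ _ h h' => absurd h' (lt_asymm h)) h₁ h₂

-- flatMap over a filter = flatMap of the guarded function
theorem flatMap_filter_guard {α β : Type} (p : α → Bool) (g : α → List β) (l : List α) :
    (l.filter p).flatMap g = l.flatMap (fun x => if p x then g x else []) := by
  induction l with
  | nil => simp
  | cons x xs ih => by_cases h : p x = true <;> simp [h, ih]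

-- filtering a shifted range to [0,64) and shifting = the clipped range
theorem map_filter_pyRange_clip (a : Int) (n : Int) :
    ((PySem.List.pyRange 0 n 1).filter (fun i => decide (0 ≤ a + i ∧ a + i < 64))).map
        (fun i => a + i)
      = PySem.List.pyRange (max a 0) (min (a + n) 64) 1 := by
  apply eq_of_pairwise_lt_of_mem_iff
  · rw [List.pairwise_map]
    exact (PySem.List.pairwise_lt_pyRange_one 0 n).filter _ |>.imp (by omega)
  · exact PySem.List.pairwise_lt_pyRange_one _ _
  · intro x
    simp only [List.mem_map, List.mem_filter, PySem.List.mem_pyRange_one, decide_eq_true_eq]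
    constructor
    · rintro ⟨i, ⟨⟨h0, hn⟩, hb⟩, rfl⟩; omega
    · intro hx; exact ⟨x - a, by omega, by omega⟩

theorem get_vehicle_pixels_spec : Claim_equal_get_vehicle_pixels := by
  intro r c height width _
  unfold Spec_get_vehicle_pixels get_vehicle_pixels get_vehicle_pixels_alt
  simp only [PySem.List.foldl_append_if (p := fun j => in_bounds (r + _) (c + j))
    (f := fun j => (r + _, c + j)), PySem.List.foldl_append_eq_flatMap, List.nil_append]
  rw [← map_filter_pyRange_clip r height, ← map_filter_pyRange_clip c width,
    List.flatMap_map]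
  rw [flatMap_filter_guard]
  apply List.flatMap_congr
  intro i _
  by_cases hr : (0 ≤ r + i ∧ r + i < 64)
  · simp only [hr, and_self, decide_true, if_true]
    rw [List.filter_congr (q := fun j => decide (0 ≤ c + j ∧ c + j < 64))
      (fun j _ => by simp [in_bounds, hr])]
    simp [List.map_map, Function.comp_def]
  · simp only [hr, decide_false, Bool.false_eq_true, if_false]
    rw [List.filter_eq_nil_iff.mpr (fun j _ => by simp [in_bounds, hr])]
    simp

-- ===== VERDICT (by name: the statement is the Claim_ definition above) =====
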